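-- pv_equiv track=rewrite | github.com/ychen810811/crypto_python | freq_analysis.py | letter_sorted_per_freq_2
-- ===== SOURCE A (Python) =====
-- LETTERS = 'ABCDEFGHIJKLMNOPQRSTUVWXYZ'
--
-- ETAOIN = 'ETAOINSHRDLCUMWFGYPBVKJXQZ'
--
-- def letter_count(string):
--     letter_occurrences = {}
--     for c in LETTERS:
--         letter_occurrences[c.upper()] = 0
--     for c in string:
--         if c.upper() in LETTERS:
--             letter_occurrences[c.upper()] += 1
--     return letter_occurrences
--
-- def letter_sorted_per_freq_2(string):
--     freq_letters = letter_count(string)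
--
--     letter_freq = {}
--     for letter in LETTERS:
--         if freq_letters[letter] not in letter_freq:
--             letter_freq[freq_letters[letter]] = [letter]
--         else:
--             letter_freq[freq_letters[letter]].append(letter)
--
--     for freq in letter_freq:
--         letter_freq[freq].sort(key=ETAOIN.find, reverse=True)
--         letter_freq[freq] = ''.join(letter_freq[freq])
--
--     list_freq_string_pairs = list(letter_freq.items())
--     list_freq_string_pairs.sort(key=_return_key_value, reverse=True)
--     list_sorted_strings = []
--     for o in list_freq_string_pairs:
--         list_sorted_strings.append(o[1])
--
--     return ''.join(list_sorted_strings)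
--
-- def _return_key_value(x):
--     return x[0]
-- ===== SOURCE B (Python) =====
-- LETTERS = 'ABCDEFGHIJKLMNOPQRSTUVWXYZ'
--
-- ETAOIN = 'ETAOINSHRDLCUMWFGYPBVKJXQZ'
--
-- def letter_sorted_per_freq_2(string):
--     # no letter_count dict, no frequency buckets: uppercase once, then ONE
--     # stable sort of the 26 letters by the composite key
--     # (frequency, ETAOIN index), both descending
--     up = string.upper()
--     return ''.join(sorted(LETTERS, key=lambda l: (up.count(l), ETAOIN.find(l)), reverse=True))
-- ===== Notes on version B (the rewrite author's own statement) =====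
-- stated objective: simpler
-- what changed: Drops letter_count and A's frequency-bucket dict, per-bucket ETAOIN sort, per-bucket join and final pair sort entirely: B uppercases the string once and does ONE stable sort of the 26 letters keyed by the tuple (up.count(letter), ETAOIN.find(letter)), reverse=True.
import Mathlib
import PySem

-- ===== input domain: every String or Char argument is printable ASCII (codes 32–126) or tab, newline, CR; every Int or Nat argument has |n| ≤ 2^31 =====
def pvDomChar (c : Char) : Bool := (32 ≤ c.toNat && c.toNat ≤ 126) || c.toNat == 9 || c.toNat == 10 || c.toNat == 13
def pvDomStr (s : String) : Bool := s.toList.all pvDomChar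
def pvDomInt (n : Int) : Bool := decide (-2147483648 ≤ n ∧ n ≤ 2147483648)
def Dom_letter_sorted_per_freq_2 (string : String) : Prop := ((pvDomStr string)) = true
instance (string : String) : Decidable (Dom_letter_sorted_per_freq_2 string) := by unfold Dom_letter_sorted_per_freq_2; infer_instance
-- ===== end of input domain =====

-- B drops letter_count and A's bucket-dict + per-bucket sort + pair sort: it uppercases the
-- string once and does ONE stable sort of the 26 letters keyed by
-- (count in uppercased string, ETAOIN index), both descending (objective: simpler).

def pvLETTERS : String := "ABCDEFGHIJKLMNOPQRSTUVWXYZ"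
def pvETAOIN : String := "ETAOINSHRDLCUMWFGYPBVKJXQZ"
-- ETAOIN.find(l) for a one-character string l
def pvFind (l : Char) : Int := PySem.Chars.find pvETAOIN.toList [l]

-- ===== PORT A =====
-- letter_count, the helper A calls
def pvLetterCount (string : String) : PySem.Dict Char Int :=
  let d0 := pvLETTERS.toList.foldl (fun d c => d.insert (PySem.Chars.upperChar c) 0) PySem.Dict.empty
  string.toList.foldl (fun d c =>
    if PySem.Chars.isIn [PySem.Chars.upperChar c] pvLETTERS.toList
    -- '+=' reads then overwrites an existing key (the guard guarantees the key is initialised): modify is exact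
    then d.modify (PySem.Chars.upperChar c) 0 (· + 1)
    else d) d0

def letter_sorted_per_freq_2 (string : String) : String :=
  let freq_letters := pvLetterCount string
  -- freq_letters[letter]: the key is always present (all 26 letters initialised), so getD is exact
  let letter_freq : PySem.Dict Int (List Char) :=
    pvLETTERS.toList.foldl (fun lf letter =>
      if lf.contains (freq_letters.getD letter 0) = false
      then lf.insert (freq_letters.getD letter 0) [letter]
      else lf.modify (freq_letters.getD letter 0) [] (· ++ [letter])) PySem.Dict.empty
  -- 'for freq in letter_freq:' rewrites each existing value in place (keys untouched): a map over items is exact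
  let letter_freq2 : PySem.Dict Int String :=
    PySem.Dict.mk (letter_freq.items.map (fun p => (p.1, String.ofList (PySem.List.sorted p.2 pvFind true))))
  let list_freq_string_pairs := PySem.List.sorted letter_freq2.items (fun p => p.1) true
  let list_sorted_strings := list_freq_string_pairs.foldl (fun acc o => acc ++ [o.2]) ([] : List String)
  PySem.Str.join "" list_sorted_strings

-- ===== PORT B =====
def letter_sorted_per_freq_2_alt (string : String) : String :=
  -- up = string.upper(); up.count(l) is PySem.Chars.count on the char list;
  -- the tuple key (count, ETAOIN.find) with reverse=True is sorted2 … true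
  let up := PySem.Chars.upper string.toList
  String.ofList (PySem.List.sorted2 pvLETTERS.toList
    (fun l => (PySem.Chars.count up [l] : Int))
    (fun l => pvFind l) true)

-- ===== PRECONDITION & SPEC =====
def Spec_letter_sorted_per_freq_2 (string : String) (out : String) : Prop := out = letter_sorted_per_freq_2_alt string
instance (string : String) (out : String) : Decidable (Spec_letter_sorted_per_freq_2 string out) := by unfold Spec_letter_sorted_per_freq_2; infer_instance

-- ===== CLAIM (what is proved, stated in full; the proofs are below) =====
def Claim_equal_letter_sorted_per_freq_2 : Prop := ∀ (string : String), Dom_letter_sorted_per_freq_2 string → Spec_letter_sorted_per_freq_2 string (letter_sorted_per_freq_2 string)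

-- ===== LEMMAS AND PROOFS =====

-- the combined key: ordering by it descending = (frequency desc, ETAOIN index desc) lexicographically
def pvK2 (g : Char → Int) (l : Char) : Int := 26 * g l + pvFind l

-- literal facts about the alphabet
lemma pv_nodup : pvLETTERS.toList.Nodup := by decide
set_option maxRecDepth 20000 in
lemma pv_find_vals : pvLETTERS.toList.map pvFind = [2,19,11,9,0,15,16,7,4,22,21,10,13,5,3,18,24,8,6,1,12,20,14,23,17,25] := by rfl

lemma pv_bounds : ∀ l ∈ pvLETTERS.toList, 0 ≤ pvFind l ∧ pvFind l ≤ 25 := by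
  intro l hl
  have h : pvFind l ∈ pvLETTERS.toList.map pvFind := List.mem_map_of_mem hl
  rw [pv_find_vals] at h
  have hall : ∀ x ∈ ([2,19,11,9,0,15,16,7,4,22,21,10,13,5,3,18,24,8,6,1,12,20,14,23,17,25] : List Int), 0 ≤ x ∧ x ≤ 25 := by decide
  exact hall _ h

lemma pv_inj : ∀ a ∈ pvLETTERS.toList, ∀ b ∈ pvLETTERS.toList, pvFind a = pvFind b → a = b := by
  have hnd : (pvLETTERS.toList.map pvFind).Nodup := by rw [pv_find_vals]; decide
  intro a ha b hb h
  exact List.inj_on_of_nodup_map hnd ha hb h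

-- pvK2 strict comparisons for letters
lemma pv_K2_inj (g : Char → Int) :
    ∀ a ∈ pvLETTERS.toList, ∀ b ∈ pvLETTERS.toList, pvK2 g a = pvK2 g b → a = b := by
  intro a ha b hb h
  have hba := pv_bounds a ha
  have hbb := pv_bounds b hb
  unfold pvK2 at h
  exact pv_inj a ha b hb (by omega)

-- B side: sorted2 … true is definitionally this insertion fold (lex comparator, reversed)
lemma pv_sorted2_rev (xs : List Char) (k1 k2 : Char → Int) :
    PySem.List.sorted2 xs k1 k2 true
      = xs.foldl (fun acc x => PySem.List.insertBy
          (fun x y => decide (k1 y < k1 x) || (!decide (k1 x < k1 y) && decide (k2 y < k2 x))) x acc) [] := rfl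

-- the lex comparator on letters decides pvK2 strictly (g2 agrees with g on letters)
lemma pv_cmp_iff (g g2 : Char → Int) (heq : ∀ l ∈ pvLETTERS.toList, g2 l = g l)
    (x y : Char) (hx : x ∈ pvLETTERS.toList) (hy : y ∈ pvLETTERS.toList) :
    (decide (g2 y < g2 x) || (!decide (g2 x < g2 y) && decide (pvFind y < pvFind x))) = true
      ↔ pvK2 g y < pvK2 g x := by
  have hbx := pv_bounds x hx
  have hby := pv_bounds y hy
  rw [heq x hx, heq y hy]
  unfold pvK2
  simp only [Bool.or_eq_true, Bool.and_eq_true, Bool.not_eq_eq_eq_not, Bool.not_true,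
    decide_eq_true_eq, decide_eq_false_iff_not]
  omega

lemma pv_ins2_pw (g g2 : Char → Int) (heq : ∀ l ∈ pvLETTERS.toList, g2 l = g l)
    (x : Char) (acc : List Char)
    (hx : x ∈ pvLETTERS.toList)
    (hacc : ∀ y ∈ acc, y ∈ pvLETTERS.toList)
    (hxacc : x ∉ acc)
    (hpw : acc.Pairwise (fun a b => pvK2 g b < pvK2 g a)) :
    (PySem.List.insertBy
        (fun x y => decide (g2 y < g2 x) || (!decide (g2 x < g2 y) && decide (pvFind y < pvFind x)))
        x acc).Pairwise (fun a b => pvK2 g b < pvK2 g a) := by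
  induction acc with
  | nil => simp [PySem.List.insertBy]
  | cons y ys ih =>
      rcases List.pairwise_cons.mp hpw with ⟨hy, hys⟩
      have hyL := hacc y (by simp)
      rw [show PySem.List.insertBy
            (fun x y => decide (g2 y < g2 x) || (!decide (g2 x < g2 y) && decide (pvFind y < pvFind x)))
            x (y :: ys)
          = if (decide (g2 y < g2 x) || (!decide (g2 x < g2 y) && decide (pvFind y < pvFind x))) = true
            then x :: y :: ys
            else y :: PySem.List.insertBy
              (fun x y => decide (g2 y < g2 x) || (!decide (g2 x < g2 y) && decide (pvFind y < pvFind x)))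
              x ys from rfl]
      by_cases h : (decide (g2 y < g2 x) || (!decide (g2 x < g2 y) && decide (pvFind y < pvFind x))) = true
      · rw [if_pos h]
        have hyx : pvK2 g y < pvK2 g x := (pv_cmp_iff g g2 heq x y hx hyL).mp h
        refine List.pairwise_cons.mpr ⟨?_, hpw⟩
        intro z hz
        rcases List.mem_cons.mp hz with rfl | hz
        · exact hyx
        · exact lt_trans (hy z hz) hyx
      · rw [if_neg h]
        have hle : ¬ pvK2 g y < pvK2 g x := fun hlt => h ((pv_cmp_iff g g2 heq x y hx hyL).mpr hlt)
        have hxny : x ≠ y ∧ x ∉ ys := by simpa [List.mem_cons, not_or] using hxacc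
        have hxy : pvK2 g x < pvK2 g y := by
          have hne : pvK2 g x ≠ pvK2 g y := fun e => hxny.1 (pv_K2_inj g x hx y hyL e)
          omega
        refine List.pairwise_cons.mpr ⟨?_, ?_⟩
        · intro z hz
          rcases (PySem.List.mem_insertBy _ _ _ _).mp hz with rfl | hz
          · exact hxy
          · exact hy z hz
        · exact ih (fun z hz => hacc z (by simp [hz])) hxny.2 hys

lemma pv_fold2_pw (g g2 : Char → Int) (heq : ∀ l ∈ pvLETTERS.toList, g2 l = g l)
    (xs : List Char) (acc : List Char)
    (hxsL : ∀ y ∈ xs, y ∈ pvLETTERS.toList)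
    (haccL : ∀ y ∈ acc, y ∈ pvLETTERS.toList)
    (hnd : xs.Nodup)
    (hdisj : ∀ y ∈ xs, y ∉ acc)
    (hpw : acc.Pairwise (fun a b => pvK2 g b < pvK2 g a)) :
    (xs.foldl (fun acc x => PySem.List.insertBy
        (fun x y => decide (g2 y < g2 x) || (!decide (g2 x < g2 y) && decide (pvFind y < pvFind x)))
        x acc) acc).Pairwise (fun a b => pvK2 g b < pvK2 g a) := by
  induction xs generalizing acc with
  | nil => simpa using hpw
  | cons x t ih =>
      rcases List.nodup_cons.mp hnd with ⟨hxt, hndt⟩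
      simp only [List.foldl_cons]
      refine ih _ (fun z hz => hxsL z (by simp [hz])) ?_ hndt ?_ ?_
      · intro z hz
        rcases (PySem.List.mem_insertBy _ _ _ _).mp hz with rfl | hz
        · exact hxsL z (by simp)
        · exact haccL z hz
      · intro z hz hmem
        rcases (PySem.List.mem_insertBy _ _ _ _).mp hmem with rfl | hmem
        · exact hxt hz
        · exact hdisj z (by simp [hz]) hmem
      · exact pv_ins2_pw g g2 heq x acc (hxsL x (by simp)) haccL
          (hdisj x (by simp)) hpw

lemma pv_B2_pairwise (g g2 : Char → Int) (heq : ∀ l ∈ pvLETTERS.toList, g2 l = g l) :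
    (PySem.List.sorted2 pvLETTERS.toList g2 pvFind true).Pairwise
      (fun a b => pvK2 g b < pvK2 g a) := by
  rw [pv_sorted2_rev]
  exact pv_fold2_pw g g2 heq _ [] (fun y hy => hy) (by simp) pv_nodup (by simp) (by simp)

-- counting: Chars.count with a one-character needle is List.count
lemma pv_count_go (c : Char) (l : List Char) (fuel acc : Nat) (h : l.length ≤ fuel) :
    PySem.Chars.count.go [c] fuel l acc = acc + l.count c := by
  induction l generalizing fuel acc with
  | nil => cases fuel <;> simp [PySem.Chars.count.go]
  | cons a t ih =>
      cases fuel with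
      | zero => simp at h
      | succ f =>
          rw [show PySem.Chars.count.go [c] (f + 1) (a :: t) acc
              = if ([c].isPrefixOf (a :: t)) = true
                then PySem.Chars.count.go [c] f (List.drop ([c] : List Char).length (a :: t)) (acc + 1)
                else PySem.Chars.count.go [c] f t acc from rfl]
          simp only [List.isPrefixOf, List.length_cons, List.length_nil, List.drop_succ_cons,
            List.drop_zero, List.count_cons]
          by_cases hca : c == a
          · rw [if_pos (by simp [hca]), ih f (acc + 1) (by simpa using h)]
            have : a == c := by simp_all
            simp [this]
            omega
          · rw [if_neg (by simp_all), ih f acc (by simpa using h)]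
            have : (a == c) = false := beq_eq_false_iff_ne.mpr (fun e => hca (beq_iff_eq.mpr e.symm))
            simp [this]

lemma pv_count_singleton (s : List Char) (c : Char) :
    PySem.Chars.count s [c] = s.count c := by
  rw [show PySem.Chars.count s [c] = PySem.Chars.count.go [c] s.length s 0 from rfl,
    pv_count_go c s s.length 0 le_rfl]
  simp

-- the count-based frequency equals letter_count's dict entry, on every letter
lemma pv_freq_eq (string : String) : ∀ l ∈ pvLETTERS.toList,
    ((PySem.Chars.count (PySem.Chars.upper string.toList) [l] : Nat) : Int)
      = (pvLetterCount string).getD l 0 := by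
  intro l hl
  unfold pvLetterCount
  set d0 := pvLETTERS.toList.foldl
      (fun (d : PySem.Dict Char Int) c => d.insert (PySem.Chars.upperChar c) 0) PySem.Dict.empty
      with hd0
  have h0 : d0.getD l 0 = 0 := by
    have hall : (pvLETTERS.toList.all (fun m =>
        (pvLETTERS.toList.foldl (fun (d : PySem.Dict Char Int) c =>
          d.insert (PySem.Chars.upperChar c) 0) PySem.Dict.empty).getD m 0 == 0)) = true := by rfl
    rw [hd0]
    simpa using (List.all_eq_true.mp hall) l hl
  -- pull the guard out as a filter, then the key computation as a map
  rw [← List.foldl_filter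
      (p := fun c => PySem.Chars.isIn [PySem.Chars.upperChar c] pvLETTERS.toList)
      (f := fun (d : PySem.Dict Char Int) c => d.modify (PySem.Chars.upperChar c) 0 (· + 1)),
    ← List.foldl_map (f := PySem.Chars.upperChar)
      (g := fun (d : PySem.Dict Char Int) x => d.modify x 0 (· + 1)),
    PySem.Dict.getD_foldl_modify_add_one, h0, zero_add]
  -- left side: Chars.count over the uppercased list is a plain List.count over the map
  rw [show PySem.Chars.upper string.toList = string.toList.map PySem.Chars.upperChar from rfl,
    pv_count_singleton]
  -- the filter drops only characters whose uppercase is not a letter, hence never l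
  rw [List.count_eq_countP, List.count_eq_countP, List.countP_map, List.countP_map,
    List.countP_filter]
  have hin : ∀ m ∈ pvLETTERS.toList, PySem.Chars.isIn [m] pvLETTERS.toList = true := by
    have hall : (pvLETTERS.toList.all (fun m => PySem.Chars.isIn [m] pvLETTERS.toList)) = true := by rfl
    simpa [List.all_eq_true] using hall
  refine congrArg _ (List.countP_congr ?_)
  intro c _
  simp only [Function.comp, Bool.and_eq_true, beq_iff_eq]
  constructor
  · exact fun h => ⟨h, by rw [h]; exact hin l hl⟩
  · exact fun h => h.1

-- generic list helpers
lemma pv_foldl_append (l : List (Int × String)) (acc : List String) :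
    l.foldl (fun acc o => acc ++ [o.2]) acc = acc ++ l.map (fun o => o.2) := by
  induction l generalizing acc with
  | nil => simp
  | cons p t ih => simp [List.foldl_cons, ih, List.append_assoc]

lemma pv_join_nil_flatten (parts : List (List Char)) :
    PySem.Chars.join [] parts = parts.flatten := by
  induction parts with
  | nil => exact PySem.Chars.join_nil []
  | cons a t ih =>
      cases t with
      | nil => simp [PySem.Chars.join_singleton]
      | cons b r => rw [PySem.Chars.join_cons_cons, ih]; simp

lemma pv_flatten_map_perm {α β : Type} (K : List α) (h1 h2 : α → List β)
    (h : ∀ x ∈ K, (h1 x).Perm (h2 x)) :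
    ((K.map h1).flatten).Perm ((K.map h2).flatten) := by
  induction K with
  | nil => simp
  | cons a t ih =>
      simp only [List.map_cons, List.flatten_cons]
      exact (h a (by simp)).append (ih (fun x hx => h x (by simp [hx])))

lemma pv_sum_ite (K : List Int) (hnd : K.Nodup) (x : Int) (v : Nat) :
    (K.map (fun f => if x = f then v else 0)).sum = if x ∈ K then v else 0 := by
  induction K with
  | nil => simp
  | cons a t ih =>
      rcases List.nodup_cons.mp hnd with ⟨ha, hnt⟩
      by_cases hx : x = a
      · subst hx
        have : (t.map (fun f => if x = f then v else 0)).sum = 0 := by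
          rw [List.sum_eq_zero]; intro y hy
          rcases List.mem_map.mp hy with ⟨f, hf, rfl⟩
          simp [show x ≠ f from fun h => ha (h ▸ hf)]
        simp [this]
      · simp [hx, ih hnt]

-- the buckets over the distinct keys partition LETTERS (as a multiset)
lemma pv_flatten_buckets_perm (g : Char → Int) (K : List Int) (hnd : K.Nodup)
    (hK : ∀ c ∈ pvLETTERS.toList, g c ∈ K) :
    ((K.map (fun f => pvLETTERS.toList.filter (fun l => g l == f))).flatten).Perm pvLETTERS.toList := by
  rw [List.perm_iff_count]
  intro c
  rw [List.count_flatten, List.map_map]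
  have hmap : (K.map (List.count c ∘ fun f => pvLETTERS.toList.filter (fun l => g l == f)))
      = K.map (fun f => if g c = f then pvLETTERS.toList.count c else 0) := by
    apply List.map_congr_left
    intro f _
    by_cases h : g c = f
    · simp only [Function.comp, if_pos h]
      exact List.count_filter (by simp [h])
    · simp only [Function.comp, if_neg h]
      rw [List.count_eq_zero]
      intro hc
      exact h (by simpa using (List.mem_filter.mp hc).2)
  rw [hmap, pv_sum_ite K hnd]
  by_cases hc : c ∈ pvLETTERS.toList
  · simp [hK c hc]
  · have : pvLETTERS.toList.count c = 0 := List.count_eq_zero.mpr hc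
    simp [this]

lemma pv_items_mk (xs : List (Int × String)) : (PySem.Dict.mk xs).items = xs := rfl

-- the central lemma: for ANY frequency g (A's dict) and any g2 agreeing with g on the
-- letters (B's substring count), A's pipeline equals B's single composite-key sort
set_option maxHeartbeats 2000000 in
lemma pv_main (g g2 : Char → Int) (heq : ∀ l ∈ pvLETTERS.toList, g2 l = g l) :
    PySem.Str.join ""
      ((PySem.List.sorted
          (PySem.Dict.mk
            ((pvLETTERS.toList.foldl (fun lf letter =>
                if lf.contains (g letter) = false
                then lf.insert (g letter) [letter]
                else lf.modify (g letter) [] (· ++ [letter])) PySem.Dict.empty).items.map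
              (fun p => (p.1, String.ofList (PySem.List.sorted p.2 pvFind true))))).items
          (fun p => p.1) true).foldl (fun acc o => acc ++ [o.2]) ([] : List String))
    = String.ofList (PySem.List.sorted2 pvLETTERS.toList g2 pvFind true) := by
  -- Step 1: both branches of the bucket-building step are the same 'modify'
  have hstep : (fun (lf : PySem.Dict Int (List Char)) letter =>
      if lf.contains (g letter) = false then lf.insert (g letter) [letter]
      else lf.modify (g letter) [] (· ++ [letter]))
      = fun (lf : PySem.Dict Int (List Char)) letter => lf.modify (g letter) [] (· ++ [letter]) := by
    funext lf letter
    by_cases h : lf.contains (g letter) = false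
    · simp only [if_pos h, PySem.Dict.modify, PySem.Dict.getD_of_not_contains _ _ h,
        List.nil_append]
    · simp [h]
  rw [hstep]
  set D := pvLETTERS.toList.foldl
      (fun (lf : PySem.Dict Int (List Char)) letter => lf.modify (g letter) [] (· ++ [letter]))
      PySem.Dict.empty with hDdef
  have hDpairs : D = (pvLETTERS.toList.map (fun l => ((g l : Int), l))).foldl
      (fun d p => d.modify p.1 [] (· ++ [p.2])) PySem.Dict.empty := by
    rw [hDdef, List.foldl_map]
  -- Step 2: keys and buckets of D
  have hnd : D.keys.Nodup := by
    rw [hDpairs]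
    exact PySem.Dict.nodup_keys_foldl_modify_key _ Prod.fst [] (fun d p => (· ++ [p.2])) _
      PySem.Dict.nodup_keys_empty
  have hkeysmem : ∀ f : Int, f ∈ D.keys ↔ f ∈ pvLETTERS.toList.map g := by
    intro f
    rw [hDpairs, PySem.Dict.keys_foldl_modify_key]
    simp [PySem.Set.mem_update, PySem.Dict.keys_empty, List.map_map, Function.comp]
  have hbucket : ∀ f : Int, D.getD f []
      = pvLETTERS.toList.filter (fun l => g l == f) := by
    intro f
    rw [hDpairs, PySem.Dict.getD_foldl_modify_append]
    rw [PySem.Dict.getD_empty, List.nil_append, List.filter_map, List.map_map]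
    have : ((fun (x : Int × Char) => x.2) ∘ fun l => ((g l : Int), l)) = id := rfl
    rw [this, List.map_id]
    rfl
  have hitems : D.items = D.keys.map (fun f => (f, pvLETTERS.toList.filter (fun l => g l == f))) := by
    rw [PySem.Dict.items_eq_map_keys D hnd []]
    exact List.map_congr_left (fun f _ => by rw [hbucket])
  -- Step 3: items of the value-rewritten dict
  have hitems2 : (PySem.Dict.mk (D.items.map
        (fun p => (p.1, String.ofList (PySem.List.sorted p.2 pvFind true))))).items
      = D.keys.map (fun f => (f, String.ofList
          (PySem.List.sorted (pvLETTERS.toList.filter (fun l => g l == f)) pvFind true))) := by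
    rw [pv_items_mk, hitems, List.map_map]
    rfl
  rw [hitems2, pv_foldl_append, List.nil_append]
  set SP := PySem.List.sorted
      (D.keys.map (fun f => (f, String.ofList
        (PySem.List.sorted (pvLETTERS.toList.filter (fun l => g l == f)) pvFind true))))
      (fun p => p.1) true with hSPdef
  have hSPperm : SP.Perm (D.keys.map (fun f => (f, String.ofList
      (PySem.List.sorted (pvLETTERS.toList.filter (fun l => g l == f)) pvFind true)))) :=
    PySem.List.sorted_perm _ _ _
  have hSPmem : ∀ p ∈ SP, ∃ f ∈ D.keys, p = (f, String.ofList
      (PySem.List.sorted (pvLETTERS.toList.filter (fun l => g l == f)) pvFind true)) := by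
    intro p hp
    have := (PySem.List.mem_sorted _ _ _ _).mp hp
    rcases List.mem_map.mp this with ⟨f, hf, rfl⟩
    exact ⟨f, hf, rfl⟩
  -- Step 4: SP is strictly descending in the key
  have hfstnodup : (SP.map Prod.fst).Nodup := by
    refine ((hSPperm.map Prod.fst).nodup_iff).mpr ?_
    rw [List.map_map]
    have : (Prod.fst ∘ fun f => ((f : Int), String.ofList
        (PySem.List.sorted (pvLETTERS.toList.filter (fun l => g l == f)) pvFind true))) = id := rfl
    rw [this, List.map_id]
    exact hnd
  have hstrict : SP.Pairwise (fun p q => q.1 < p.1) := by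
    have h1 : SP.Pairwise (fun p q => q.1 ≤ p.1) := PySem.List.sorted_pairwise_rev _ _
    have h2 : SP.Pairwise (fun p q => p.1 ≠ q.1) := List.pairwise_map.mp hfstnodup
    exact (h1.and h2).imp (fun h => lt_of_le_of_ne h.1 (fun e => h.2 e.symm))
  -- Step 5: the flattened char list
  set LA := ((SP.map (fun o => o.2)).map String.toList).flatten with hLAdef
  -- membership facts for bucket elements
  have hbmem : ∀ f : Int, ∀ l ∈ PySem.List.sorted
      (pvLETTERS.toList.filter (fun l => g l == f)) pvFind true,
      l ∈ pvLETTERS.toList ∧ g l = f := by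
    intro f l hl
    have := (PySem.List.mem_sorted _ _ _ _).mp hl
    rcases List.mem_filter.mp this with ⟨h1, h2⟩
    exact ⟨h1, by simpa using h2⟩
  -- pairwise in pvK2 over LA
  have hLApw : LA.Pairwise (fun a b => pvK2 g b < pvK2 g a) := by
    rw [hLAdef, List.pairwise_flatten]
    constructor
    · intro chunk hchunk
      rcases List.mem_map.mp hchunk with ⟨str, hstr, rfl⟩
      rcases List.mem_map.mp hstr with ⟨p, hp, rfl⟩
      rcases hSPmem p hp with ⟨f, hf, rfl⟩
      simp only [String.toList_ofList]
      set B := PySem.List.sorted (pvLETTERS.toList.filter (fun l => g l == f)) pvFind true with hBdef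
      have hBnodup : B.Nodup :=
        ((PySem.List.sorted_perm _ _ _).nodup_iff).mpr (pv_nodup.filter _)
      have hle : B.Pairwise (fun a b => pvFind b ≤ pvFind a) := PySem.List.sorted_pairwise_rev _ _
      have hne : B.Pairwise (fun a b => a ≠ b) := hBnodup
      refine ((hle.and hne).imp_of_mem ?_)
      intro a b ha hb h
      have ⟨haL, hga⟩ := hbmem f a ha
      have ⟨hbL, hgb⟩ := hbmem f b hb
      have hfind : pvFind b < pvFind a :=
        lt_of_le_of_ne h.1 (fun e => h.2 (pv_inj b hbL a haL e).symm)
      unfold pvK2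
      rw [hga, hgb]
      omega
    · rw [List.map_map, List.pairwise_map]
      refine hstrict.imp_of_mem ?_
      intro p q hp hq hlt x hx y hy
      rcases hSPmem p hp with ⟨f1, hf1, rfl⟩
      rcases hSPmem q hq with ⟨f2, hf2, rfl⟩
      simp only [Function.comp, String.toList_ofList] at hx hy
      have ⟨hxL, hgx⟩ := hbmem f1 x hx
      have ⟨hyL, hgy⟩ := hbmem f2 y hy
      have hbx := pv_bounds x hxL
      have hby := pv_bounds y hyL
      simp only at hlt
      unfold pvK2
      rw [hgx, hgy]
      omega
  -- permutation: LA is a permutation of the alphabet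
  have hLAperm : LA.Perm pvLETTERS.toList := by
    rw [hLAdef, List.map_map]
    have h1 : ((SP.map (String.toList ∘ fun o => o.2)).flatten).Perm
        (((D.keys.map (fun f => ((f : Int), String.ofList
          (PySem.List.sorted (pvLETTERS.toList.filter (fun l => g l == f)) pvFind true)))).map
            (String.toList ∘ fun o => o.2)).flatten) :=
      (hSPperm.map _).flatten
    have h2 : ((D.keys.map (fun f => ((f : Int), String.ofList
          (PySem.List.sorted (pvLETTERS.toList.filter (fun l => g l == f)) pvFind true)))).map
            (String.toList ∘ fun o => o.2))
        = D.keys.map (fun f => PySem.List.sorted (pvLETTERS.toList.filter (fun l => g l == f)) pvFind true) := by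
      rw [List.map_map]
      exact List.map_congr_left (fun f _ => by simp [Function.comp, String.toList_ofList])
    have h3 := pv_flatten_map_perm D.keys
        (fun f => PySem.List.sorted (pvLETTERS.toList.filter (fun l => g l == f)) pvFind true)
        (fun f => pvLETTERS.toList.filter (fun l => g l == f))
        (fun f _ => PySem.List.sorted_perm _ _ _)
    have h4 := pv_flatten_buckets_perm g D.keys hnd
        (fun c hc => (hkeysmem (g c)).mpr (List.mem_map_of_mem hc))
    rw [h2] at h1
    exact (h1.trans h3).trans h4
  -- Step 6: both sides are THE strictly-pvK2-descending permutation of the alphabet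
  have hA : PySem.List.sorted pvLETTERS.toList (pvK2 g) true = LA :=
    PySem.List.sorted_rev_eq_of_perm_of_pairwise_gt _ _ _ hLAperm hLApw
  have hB : PySem.List.sorted pvLETTERS.toList (pvK2 g) true
      = PySem.List.sorted2 pvLETTERS.toList g2 pvFind true :=
    PySem.List.sorted_rev_eq_of_perm_of_pairwise_gt _ _ _
      (PySem.List.sorted2_perm _ _ _ _) (pv_B2_pairwise g g2 heq)
  have hAB : LA = PySem.List.sorted2 pvLETTERS.toList g2 pvFind true := hA ▸ hB
  -- Step 7: back to strings
  have hjoin : (PySem.Str.join "" (SP.map (fun o => o.2))).toList = LA := by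
    rw [PySem.Str.toList_join, show ("" : String).toList = [] from rfl, pv_join_nil_flatten,
      hLAdef, List.map_map]
  calc PySem.Str.join "" (SP.map (fun o => o.2))
      = String.ofList (PySem.Str.join "" (SP.map (fun o => o.2))).toList := String.ofList_toList.symm
    _ = String.ofList LA := by rw [hjoin]
    _ = String.ofList (PySem.List.sorted2 pvLETTERS.toList g2 pvFind true) := by rw [hAB]

-- ===== VERDICT (by name: the statement is the Claim_ definition above) =====
theorem letter_sorted_per_freq_2_spec : Claim_equal_letter_sorted_per_freq_2 := by
  intro string _
  unfold Spec_letter_sorted_per_freq_2 letter_sorted_per_freq_2 letter_sorted_per_freq_2_alt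
  exact pv_main (fun l => (pvLetterCount string).getD l 0)
    (fun l => (PySem.Chars.count (PySem.Chars.upper string.toList) [l] : Int))
    (pv_freq_eq string)
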